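-- pv_equiv track=rewrite | github.com/chawuciren11/Sync-R1 | Sync-R1/evaluation/pipeline.py | _generation_stage_task_order
-- ===== SOURCE A (Python) =====
-- def _generation_stage_task_order(task_names: list[str]) -> list[str]:
--     original_order = {task_name: idx for idx, task_name in enumerate(task_names)}
--     priority = {
--         "rec": 10,
--         "vqa": 10,
--         "qa": 10,
--         "rea": 10,
--         "dense_rea": 10,
--         "pure_gen": 20,
--         "dense_gen": 20,
--         "rea_gen": 30,
--         "dense_rea_gen": 30,
--     }
--     return sorted(task_names, key=lambda name: (priority.get(name, 20), original_order[name]))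
-- ===== SOURCE B (Python) =====
-- def _generation_stage_task_order(task_names: list[str]) -> list[str]:
--     priority = {
--         "rec": 10,
--         "vqa": 10,
--         "qa": 10,
--         "rea": 10,
--         "dense_rea": 10,
--         "pure_gen": 20,
--         "dense_gen": 20,
--         "rea_gen": 30,
--         "dense_rea_gen": 30,
--     }
--     b10, b20, b30 = [], [], []
--     for name in task_names:
--         p = priority.get(name, 20)
--         if p == 10:
--             b10.append(name)
--         if p == 20:
--             b20.append(name)
--         if p == 30:
--             b30.append(name)
--     return b10 + b20 + b30
-- ===== Notes on version B (the rewrite author's own statement) =====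
-- stated objective: alternative
-- what changed: Replaces the comparison sort on a (priority, original index) composite key by a single-pass three-way bucket partition (priority values are only 10/20/30) followed by concatenation of the buckets in priority order.
-- outside the precondition, e.g. on _generation_stage_task_order(['a', 'b', 'a']): A returns ['b', 'a', 'a'], B returns ['a', 'b', 'a']
import Mathlib
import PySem

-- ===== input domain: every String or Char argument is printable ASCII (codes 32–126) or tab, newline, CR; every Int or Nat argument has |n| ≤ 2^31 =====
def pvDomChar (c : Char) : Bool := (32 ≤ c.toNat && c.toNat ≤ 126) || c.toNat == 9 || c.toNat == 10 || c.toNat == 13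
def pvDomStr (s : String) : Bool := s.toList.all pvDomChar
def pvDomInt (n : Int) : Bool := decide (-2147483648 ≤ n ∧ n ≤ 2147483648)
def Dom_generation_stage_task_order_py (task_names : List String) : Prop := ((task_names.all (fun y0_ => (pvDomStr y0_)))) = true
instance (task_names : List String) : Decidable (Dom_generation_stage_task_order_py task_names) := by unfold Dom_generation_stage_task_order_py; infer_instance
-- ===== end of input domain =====

-- B replaces the comparison sort on a composite key by a one-pass three-way bucket partition
-- (priorities are only 10/20/30) concatenated in priority order: a genuinely different traversal.

-- ===== PORT A =====
-- the literal 'priority' dict, shared verbatim by both Pythons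
def pvPriority : PySem.Dict String Int :=
  PySem.Dict.ofList [("rec", 10), ("vqa", 10), ("qa", 10), ("rea", 10), ("dense_rea", 10),
                     ("pure_gen", 20), ("dense_gen", 20), ("rea_gen", 30), ("dense_rea_gen", 30)]

-- original_order = {task_name: idx for idx, task_name in enumerate(task_names)}
def pvOriginalOrder (task_names : List String) : PySem.Dict String Int :=
  (PySem.List.enumerate task_names 0).foldl (fun d p => d.insert p.2 p.1) PySem.Dict.empty

-- sorted(task_names, key=lambda name: (priority.get(name, 20), original_order[name]))
-- original_order[name] never raises (every name of the list is a key), so .get? … .getD 0 is exact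
def generation_stage_task_order_py (task_names : List String) : List String :=
  PySem.List.sorted2 task_names
    (fun name => pvPriority.getD name 20)
    (fun name => ((pvOriginalOrder task_names).get? name).getD 0) false

-- ===== PORT B =====
def generation_stage_task_order_py_alt (task_names : List String) : List String :=
  let r : List String × List String × List String :=
    task_names.foldl (fun s name =>
      let p := pvPriority.getD name 20
      (if p = 10 then s.1 ++ [name] else s.1,
       if p = 20 then s.2.1 ++ [name] else s.2.1,
       if p = 30 then s.2.2 ++ [name] else s.2.2)) ([], [], [])
  r.1 ++ r.2.1 ++ r.2.2

-- ===== PRECONDITION & SPEC =====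
-- Pre_ excludes lists with duplicate names: there A places a duplicated name by its LAST index
-- (the dict comprehension overwrites) while B keeps the original pass order — both tie-breaks
-- are defensible on such accidental input, so it stays outside the claim.
def Pre_generation_stage_task_order_py (task_names : List String) : Prop := task_names.Nodup
instance (task_names : List String) : Decidable (Pre_generation_stage_task_order_py task_names) := by unfold Pre_generation_stage_task_order_py; infer_instance
def pvWitness_generation_stage_task_order_py : List String := ["rea_gen", "rec", "pure_gen"]

def Spec_generation_stage_task_order_py (task_names : List String) (out : List String) : Prop := out = generation_stage_task_order_py_alt task_names
instance (task_names : List String) (out : List String) : Decidable (Spec_generation_stage_task_order_py task_names out) := by unfold Spec_generation_stage_task_order_py; infer_instance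

-- ===== CLAIM (what is proved, stated in full; the proofs are below) =====
def Claim_equal_generation_stage_task_order_py : Prop := ∀ (task_names : List String), Dom_generation_stage_task_order_py task_names → Pre_generation_stage_task_order_py task_names → Spec_generation_stage_task_order_py task_names (generation_stage_task_order_py task_names)

-- ===== LEMMAS AND PROOFS =====

-- the priority of every name is 10, 20 or 30
theorem pvPrio_cases (n : String) :
    pvPriority.getD n 20 = 10 ∨ pvPriority.getD n 20 = 20 ∨ pvPriority.getD n 20 = 30 := by
  simp only [pvPriority, PySem.Dict.getD_eq_get?_getD, PySem.Dict.ofList, PySem.Dict.update,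
    List.foldl, PySem.Dict.get?_insert, PySem.Dict.get?_empty]
  split_ifs <;> simp

-- the bucket of priority p, as a filter
def pvF (p : Int) (l : List String) : List String :=
  l.filter (fun n => decide (pvPriority.getD n 20 = p))

theorem pvB_loop (l : List String) (a b c : List String) :
    l.foldl (fun s name =>
      let p := pvPriority.getD name 20
      (if p = 10 then s.1 ++ [name] else s.1,
       if p = 20 then s.2.1 ++ [name] else s.2.1,
       if p = 30 then s.2.2 ++ [name] else s.2.2)) (a, b, c) =
      (a ++ pvF 10 l, b ++ pvF 20 l, c ++ pvF 30 l) := by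
  induction l generalizing a b c with
  | nil => simp [pvF]
  | cons x t ih =>
    simp only [List.foldl_cons]
    rw [ih]
    rcases pvPrio_cases x with h | h | h <;>
      simp [pvF, h, List.append_assoc]

theorem pvB_eq_filters (task_names : List String) :
    generation_stage_task_order_py_alt task_names =
      pvF 10 task_names ++ pvF 20 task_names ++ pvF 30 task_names := by
  unfold generation_stage_task_order_py_alt
  rw [pvB_loop]
  simp

-- the three buckets are a rearrangement of the input
theorem pv_perm (l : List String) : (pvF 10 l ++ pvF 20 l ++ pvF 30 l).Perm l := by
  induction l with
  | nil => simp [pvF]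
  | cons x t ih =>
    rcases pvPrio_cases x with h | h | h
    · have e : pvF 10 (x :: t) ++ pvF 20 (x :: t) ++ pvF 30 (x :: t)
          = x :: (pvF 10 t ++ pvF 20 t ++ pvF 30 t) := by
        simp [pvF, h]
      rw [e]; exact ih.cons x
    · have e : pvF 10 (x :: t) ++ pvF 20 (x :: t) ++ pvF 30 (x :: t)
          = pvF 10 t ++ x :: (pvF 20 t ++ pvF 30 t) := by
        simp [pvF, h]
      have ih' : (pvF 10 t ++ (pvF 20 t ++ pvF 30 t)).Perm t := by
        rw [← List.append_assoc]; exact ih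
      rw [e]; exact List.perm_middle.trans (ih'.cons x)
    · have e : pvF 10 (x :: t) ++ pvF 20 (x :: t) ++ pvF 30 (x :: t)
          = (pvF 10 t ++ pvF 20 t) ++ x :: pvF 30 t := by
        simp [pvF, h]
      rw [e]; exact List.perm_middle.trans (ih.cons x)

-- sorted with a tuple key is sorted with the lexicographic key
theorem pv_sorted2_eq_sorted_lex {α : Type} (xs : List α) (k1 k2 : α → Int) :
    PySem.List.sorted2 xs k1 k2 false =
      PySem.List.sorted xs (fun x => toLex (k1 x, k2 x)) false := by
  rw [PySem.List.sorted_eq_foldl_insertBy]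
  show List.foldl _ [] xs = _
  congr 1
  funext acc x
  congr 1
  funext a b
  show (decide (k1 a < k1 b) || !decide (k1 b < k1 a) && decide (k2 a < k2 b))
      = decide (toLex (k1 a, k2 a) < toLex (k1 b, k2 b))
  rcases lt_trichotomy (k1 a) (k1 b) with h | h | h
  · simp [Prod.Lex.lt_iff, h]
  · simp [Prod.Lex.lt_iff, h]
  · simp only [Prod.Lex.lt_iff]
    simp [h, lt_asymm h, h.ne']

theorem pvOrig_items (l : List String) (h : l.Nodup) :
    (pvOriginalOrder l).items = (PySem.List.enumerate l 0).map (fun a => (a.2, a.1)) := by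
  have h2 : ((PySem.List.enumerate l 0).map (fun p : Int × String => p.2)).Nodup := by
    rw [PySem.List.map_snd_enumerate]; exact h
  have := PySem.Dict.items_foldl_insert_fresh (PySem.List.enumerate l 0)
      (fun p : Int × String => p.2) (fun p => p.1) PySem.Dict.empty
      (fun a _ => PySem.Dict.contains_empty _) h2
  simpa [pvOriginalOrder] using this

theorem pvOrig_keys_nodup (l : List String) (h : l.Nodup) : (pvOriginalOrder l).keys.Nodup := by
  have hk : (pvOriginalOrder l).keys = l := by
    simp only [PySem.Dict.keys, pvOrig_items l h, List.map_map]
    have e : ((fun p : String × Int => p.1) ∘ fun a : Int × String => (a.2, a.1)) =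
        (fun a : Int × String => a.2) := rfl
    rw [e, PySem.List.map_snd_enumerate]
  rw [hk]; exact h

-- in a duplicate-free list the original_order dict maps the i-th name to i
theorem pvOrig_get (l : List String) (h : l.Nodup) (i : Nat) (hi : i < l.length) :
    (pvOriginalOrder l).get? l[i] = some (i : Int) := by
  apply PySem.Dict.get?_of_mem_items _ _ (pvOrig_keys_nodup l h)
  rw [pvOrig_items l h]
  refine List.mem_map.mpr ⟨((i : Int), l[i]), ?_, rfl⟩
  exact (PySem.List.mem_enumerate_iff _ _ _).mpr ⟨i, hi, by simp⟩

-- the second key component is strictly increasing along a duplicate-free list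
theorem pv_idx_pairwise (l : List String) (h : l.Nodup) :
    l.Pairwise (fun a b => ((pvOriginalOrder l).get? a).getD 0 < ((pvOriginalOrder l).get? b).getD 0) := by
  rw [List.pairwise_iff_getElem]
  intro i j hi hj hij
  rw [pvOrig_get l h i hi, pvOrig_get l h j hj]
  simpa using hij

-- inside one bucket the lexicographic key is strictly increasing
theorem pv_bucket_pairwise (l : List String) (h : l.Nodup) (p : Int) :
    (pvF p l).Pairwise (fun a b =>
      toLex (pvPriority.getD a 20, ((pvOriginalOrder l).get? a).getD 0) <
      toLex (pvPriority.getD b 20, ((pvOriginalOrder l).get? b).getD 0)) := by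
  unfold pvF
  have h1 := List.Pairwise.sublist (List.filter_sublist (p := fun n => decide (pvPriority.getD n 20 = p)) (l := l)) (pv_idx_pairwise l h)
  refine h1.imp_of_mem ?_
  intro a b ha hb hlt
  have hpa : pvPriority.getD a 20 = p := by simpa using (List.mem_filter.mp ha).2
  have hpb : pvPriority.getD b 20 = p := by simpa using (List.mem_filter.mp hb).2
  exact Prod.Lex.lt_iff.mpr (Or.inr ⟨by simp [hpa, hpb], by simpa using hlt⟩)

-- across buckets of lower priority the key is strictly smaller
theorem pv_cross (l : List String) (p q : Int) (hpq : p < q) :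
    ∀ a ∈ pvF p l, ∀ b ∈ pvF q l,
      toLex (pvPriority.getD a 20, ((pvOriginalOrder l).get? a).getD 0) <
      toLex (pvPriority.getD b 20, ((pvOriginalOrder l).get? b).getD 0) := by
  intro a ha b hb
  have hpa : pvPriority.getD a 20 = p := by
    simpa using (List.mem_filter.mp ha).2
  have hpb : pvPriority.getD b 20 = q := by
    simpa using (List.mem_filter.mp hb).2
  exact Prod.Lex.lt_iff.mpr (Or.inl (by simpa [hpa, hpb] using hpq))

-- ===== VERDICT (by name: the statement is the Claim_ definition above) =====
theorem generation_stage_task_order_py_spec : Claim_equal_generation_stage_task_order_py := by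
  intro l _ hpre
  show generation_stage_task_order_py l = generation_stage_task_order_py_alt l
  unfold generation_stage_task_order_py
  rw [pv_sorted2_eq_sorted_lex, pvB_eq_filters]
  apply PySem.List.sorted_eq_of_perm_of_pairwise_lt
  · exact pv_perm l
  · rw [List.pairwise_append, List.pairwise_append]
    refine ⟨⟨pv_bucket_pairwise l hpre 10, pv_bucket_pairwise l hpre 20,
      pv_cross l 10 20 (by omega)⟩, pv_bucket_pairwise l hpre 30, ?_⟩
    intro a ha b hb
    rcases List.mem_append.mp ha with h10 | h20
    · exact pv_cross l 10 30 (by omega) a h10 b hb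
    · exact pv_cross l 20 30 (by omega) a h20 b hb
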